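-- pv_equiv track=rewrite | github.com/acatinfd/nlpproject | dataProcessing/minLength_selection.py | minLength_selection
-- ===== SOURCE A (Python) =====
-- def minLength_selection(sentence_list, tipNum, minLen):
--     sortedReviews = sorted(sentence_list, key = lambda p: len(p[2]))
--
--     minLengthSentences = []
--     k = 0
--     total = len(sortedReviews)
--
--     while len(minLengthSentences) < tipNum:
--         if k >= total:
--             break
--
--         while k < total and len(sortedReviews[k][2]) < minLen:
--             k += 1
--
--         if k < total:
--             minLengthSentences.append(sortedReviews[k])
--             #print (len(sortedReviews[k][2]), sortedReviews[k][2])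
--             k += 1
--
--     return minLengthSentences
-- ===== SOURCE B (Python) =====
-- def minLength_selection(sentence_list, tipNum, minLen):
--     # single pass: keep a sorted buffer of at most tipNum best qualifying sentences
--     best = []
--     for p in sentence_list:
--         if len(p[2]) < minLen:
--             continue
--         i = 0
--         while i < len(best) and len(best[i][2]) <= len(p[2]):
--             i += 1
--         best.insert(i, p)
--         if len(best) > tipNum:
--             best.pop()
--     return best
-- ===== Notes on version B (the rewrite author's own statement) =====
-- stated objective: alternative
-- what changed: Replaces sort-the-whole-list-then-skip-walk by a single pass that maintains a bounded sorted buffer of at most tipNum qualifying sentences (insert in place, pop the last when over capacity); no global sort is performed.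
import Mathlib
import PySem

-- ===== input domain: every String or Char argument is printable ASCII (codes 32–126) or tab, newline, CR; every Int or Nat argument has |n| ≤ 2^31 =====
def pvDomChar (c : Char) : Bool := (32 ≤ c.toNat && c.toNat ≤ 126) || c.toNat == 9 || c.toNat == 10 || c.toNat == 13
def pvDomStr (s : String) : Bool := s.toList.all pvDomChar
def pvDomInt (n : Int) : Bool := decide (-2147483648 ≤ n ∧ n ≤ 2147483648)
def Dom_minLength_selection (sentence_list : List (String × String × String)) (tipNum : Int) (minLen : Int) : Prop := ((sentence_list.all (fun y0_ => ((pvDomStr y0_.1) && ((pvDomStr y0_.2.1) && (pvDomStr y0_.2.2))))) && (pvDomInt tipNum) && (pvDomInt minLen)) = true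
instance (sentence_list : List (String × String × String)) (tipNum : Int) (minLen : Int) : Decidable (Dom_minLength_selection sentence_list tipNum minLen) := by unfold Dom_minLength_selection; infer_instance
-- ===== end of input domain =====

-- B replaces A's global sort + skip-walk by ONE pass over the input that maintains a bounded
-- sorted buffer of at most tipNum qualifying sentences; objective: alternative (no global sort).

-- ===== PORT A =====
-- inner loop: 'while k < total and len(sortedReviews[k][2]) < minLen: k += 1'
def pvSkipA (s : List (String × String × String)) (minLen : Int) (k : Nat) : Nat :=
  if h : k < s.length then
    if PySem.Str.len s[k].2.2 < minLen then pvSkipA s minLen (k + 1) else k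
  else k
termination_by s.length - k
decreasing_by omega

theorem pvSkipA_ge (s : List (String × String × String)) (minLen : Int) (k : Nat) :
    k ≤ pvSkipA s minLen k := by
  unfold pvSkipA
  split
  · split
    · exact Nat.le_of_succ_le (pvSkipA_ge s minLen (k + 1))
    · exact Nat.le_refl k
  · exact Nat.le_refl k
termination_by s.length - k
decreasing_by omega

-- outer loop: 'while len(minLengthSentences) < tipNum: …'
def pvLoopA (s : List (String × String × String)) (tipNum minLen : Int)
    (acc : List (String × String × String)) (k : Nat) : List (String × String × String) :=
  if (acc.length : Int) < tipNum then
    if k ≥ s.length then acc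
    else
      if h : pvSkipA s minLen k < s.length then
        pvLoopA s tipNum minLen (acc ++ [s[pvSkipA s minLen k]]) (pvSkipA s minLen k + 1)
      else acc
  else acc
termination_by s.length - k
decreasing_by
  have := pvSkipA_ge s minLen k
  omega

def minLength_selection (sentence_list : List (String × String × String)) (tipNum : Int) (minLen : Int) : List (String × String × String) :=
  pvLoopA (PySem.List.sorted sentence_list (fun p => PySem.Str.len p.2.2)) tipNum minLen [] 0

-- ===== PORT B =====
-- Source B's 'i = 0; while …; best.insert(i, p)': structural insertion after all elements of length ≤ len(p[2])
def pvInsB (p : String × String × String) (best : List (String × String × String)) :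
    List (String × String × String) :=
  match best with
  | [] => [p]
  | y :: ys =>
    if PySem.Str.len y.2.2 ≤ PySem.Str.len p.2.2 then y :: pvInsB p ys else p :: y :: ys

def minLength_selection_alt (sentence_list : List (String × String × String)) (tipNum : Int) (minLen : Int) : List (String × String × String) :=
  sentence_list.foldl
    (fun best p =>
      if PySem.Str.len p.2.2 < minLen then best
      else
        let b := pvInsB p best
        if (b.length : Int) > tipNum then b.dropLast else b)
    []

-- ===== PRECONDITION & SPEC =====
def Spec_minLength_selection (sentence_list : List (String × String × String)) (tipNum : Int) (minLen : Int) (out : List (String × String × String)) : Prop := out = minLength_selection_alt sentence_list tipNum minLen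
instance (sentence_list : List (String × String × String)) (tipNum : Int) (minLen : Int) (out : List (String × String × String)) : Decidable (Spec_minLength_selection sentence_list tipNum minLen out) := by unfold Spec_minLength_selection; infer_instance

-- ===== CLAIM (what is proved, stated in full; the proofs are below) =====
def Claim_equal_minLength_selection : Prop := ∀ (sentence_list : List (String × String × String)) (tipNum : Int) (minLen : Int), Dom_minLength_selection sentence_list tipNum minLen → Spec_minLength_selection sentence_list tipNum minLen (minLength_selection sentence_list tipNum minLen)

-- ===== LEMMAS AND PROOFS =====

-- The skip loop changes nothing modulo the qualifying filter, and stops on a qualifying element.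
theorem pvSkipA_spec (s : List (String × String × String)) (m : Int) (k : Nat) :
    ((s.drop (pvSkipA s m k)).filter (fun p => decide (m ≤ PySem.Str.len p.2.2))
      = (s.drop k).filter (fun p => decide (m ≤ PySem.Str.len p.2.2)))
    ∧ (∀ h : pvSkipA s m k < s.length, m ≤ PySem.Str.len (s[pvSkipA s m k]).2.2) := by
  unfold pvSkipA
  split
  · rename_i hk
    split
    · rename_i hlen
      obtain ⟨ih1, ih2⟩ := pvSkipA_spec s m (k + 1)
      refine ⟨?_, ih2⟩
      rw [ih1, List.drop_eq_getElem_cons hk, List.filter_cons]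
      simpa [PySem.Str.len_eq] using hlen
    · rename_i hlen
      exact ⟨rfl, fun _ => le_of_not_gt hlen⟩
  · rename_i hk
    exact ⟨rfl, fun h => absurd h hk⟩
termination_by s.length - k
decreasing_by omega

-- A's outer loop computes a take of the filtered remainder.
theorem pvLoopA_char (s : List (String × String × String)) (t m : Int)
    (acc : List (String × String × String)) (k : Nat) :
    pvLoopA s t m acc k
      = acc ++ (((s.drop k).filter (fun p => decide (m ≤ PySem.Str.len p.2.2))).take
          (t - acc.length).toNat) := by
  unfold pvLoopA
  split
  · rename_i hlt
    split
    · rename_i hk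
      rw [List.drop_eq_nil_of_le hk]
      simp
    · rename_i hk
      obtain ⟨hfil, hstop⟩ := pvSkipA_spec s m k
      split
      · rename_i h1
        rw [pvLoopA_char s t m (acc ++ [s[pvSkipA s m k]]) (pvSkipA s m k + 1)]
        rw [← hfil, List.drop_eq_getElem_cons h1, List.filter_cons]
        have hq' : m ≤ ((s[pvSkipA s m k]'h1).2.2.length : Int) := by
          simpa [PySem.Str.len_eq] using hstop h1
        have htn : (t - (acc.length : Int)).toNat = (t - ((acc.length : Int) + 1)).toNat + 1 := by
          omega
        simp [hq', htn]
      · rename_i h1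
        rw [← hfil, List.drop_eq_nil_of_le (by omega)]
        simp
  · rename_i hge
    have : (t - (acc.length : Int)).toNat = 0 := by omega
    simp [this]
termination_by s.length - k
decreasing_by
  have := pvSkipA_ge s m k
  omega

-- Inserting then filtering a sorted list = filtering then inserting (the stability argument).
theorem filter_insertBy {α : Type} (key : α → Int) (q : α → Bool) (x : α) (ys : List α)
    (hs : ys.Pairwise (fun a b => key a ≤ key b)) :
    (PySem.List.insertBy (fun a b => decide (key a < key b)) x ys).filter q
      = if q x then PySem.List.insertBy (fun a b => decide (key a < key b)) x (ys.filter q)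
        else ys.filter q := by
  induction ys with
  | nil => cases hqx : q x <;> simp [PySem.List.insertBy, hqx]
  | cons y ys ih =>
    rw [List.pairwise_cons] at hs
    obtain ⟨hy, hys⟩ := hs
    by_cases hb : key x < key y
    · simp only [PySem.List.insertBy, decide_eq_true_eq, hb, if_true, List.filter_cons]
      by_cases hqx : q x = true
      · by_cases hqy : q y = true
        · simp [hqx, hqy, PySem.List.insertBy, hb]
        · simp only [hqx, if_true, hqy, Bool.false_eq_true, if_false]
          cases hfy : ys.filter q with
          | nil => simp [PySem.List.insertBy]
          | cons z zs =>
            have hz : z ∈ ys := List.mem_of_mem_filter (hfy ▸ List.mem_cons_self)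
            have : key x < key z := lt_of_lt_of_le hb (hy z hz)
            simp [PySem.List.insertBy, this]
      · simp [hqx]
    · simp only [PySem.List.insertBy, decide_eq_true_eq, hb, if_false, List.filter_cons]
      rw [ih hys]
      by_cases hqx : q x = true
      · by_cases hqy : q y = true
        · simp [hqx, hqy, PySem.List.insertBy, hb]
        · simp [hqx, hqy]
      · simp [hqx]

-- insertBy preserves sortedness by the key.
theorem pairwise_insertBy {α : Type} (key : α → Int) (x : α) (ys : List α)
    (hs : ys.Pairwise (fun a b => key a ≤ key b)) :
    (PySem.List.insertBy (fun a b => decide (key a < key b)) x ys).Pairwise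
      (fun a b => key a ≤ key b) := by
  induction ys with
  | nil => simp [PySem.List.insertBy]
  | cons y ys ih =>
    rw [List.pairwise_cons] at hs
    obtain ⟨hy, hys⟩ := hs
    by_cases hb : key x < key y
    · simp only [PySem.List.insertBy, decide_eq_true_eq, hb, if_true]
      refine List.Pairwise.cons ?_ (List.Pairwise.cons hy hys)
      intro z hz
      rcases List.mem_cons.mp hz with rfl | hz
      · exact le_of_lt hb
      · exact le_trans (le_of_lt hb) (hy z hz)
    · simp only [PySem.List.insertBy, decide_eq_true_eq, hb, if_false]
      refine List.Pairwise.cons ?_ (ih hys)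
      intro z hz
      rcases (PySem.List.mem_insertBy _ _ _ _).mp hz with rfl | hz
      · exact le_of_not_gt hb
      · exact hy z hz

-- filter commutes with the stable insertion-sort fold.
theorem filter_foldl_insertBy {α : Type} (key : α → Int) (q : α → Bool) (xs acc : List α)
    (hs : acc.Pairwise (fun a b => key a ≤ key b)) :
    (xs.foldl (fun acc x => PySem.List.insertBy (fun a b => decide (key a < key b)) x acc) acc).filter q
      = (xs.filter q).foldl
          (fun acc x => PySem.List.insertBy (fun a b => decide (key a < key b)) x acc)
          (acc.filter q) := by
  induction xs generalizing acc with
  | nil => simp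
  | cons x xs ih =>
    simp only [List.foldl_cons, List.filter_cons]
    rw [ih _ (pairwise_insertBy key x acc hs), filter_insertBy key q x acc hs]
    by_cases hqx : q x = true
    · simp [hqx]
    · simp [hqx]

-- filter commutes with the stable sort.
theorem filter_sorted (key : (String × String × String) → Int) (q : (String × String × String) → Bool)
    (xs : List (String × String × String)) :
    (PySem.List.sorted xs key).filter q = PySem.List.sorted (xs.filter q) key := by
  rw [PySem.List.sorted_eq_foldl_insertBy, PySem.List.sorted_eq_foldl_insertBy]
  simpa using filter_foldl_insertBy key q xs [] (by simp)

-- B's hand-written insertion is insertBy with the strict-less test.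
theorem pvInsB_eq_insertBy (p : String × String × String)
    (best : List (String × String × String)) :
    pvInsB p best
      = PySem.List.insertBy
          (fun a b => decide (PySem.Str.len a.2.2 < PySem.Str.len b.2.2)) p best := by
  induction best with
  | nil => simp [pvInsB, PySem.List.insertBy]
  | cons y ys ih =>
    simp only [pvInsB, PySem.List.insertBy, decide_eq_true_eq, ih]
    split_ifs with h1 h2 h3 <;> first | rfl | omega

-- Truncation commutes with insertion: the first k of insertBy depend only on the first k.
theorem take_cons_take {α : Type} (y : α) (l : List α) (j : Nat) :
    (y :: l.take j).take j = (y :: l).take j := by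
  cases j with
  | zero => rfl
  | succ i => simp [List.take_succ_cons, List.take_take]

theorem take_insertBy {α : Type} (lt : α → α → Bool) (x : α) (l : List α) (k : Nat) :
    (PySem.List.insertBy lt x (l.take k)).take k = (PySem.List.insertBy lt x l).take k := by
  induction l generalizing k with
  | nil => simp
  | cons y ys ih =>
    cases k with
    | zero => simp
    | succ j =>
      by_cases hb : lt x y = true
      · simp only [List.take_succ_cons, PySem.List.insertBy, hb, if_true]
        simp [take_cons_take]
      · simp only [List.take_succ_cons, PySem.List.insertBy, hb]
        simp [List.take_succ_cons, ih j]

-- One B-step on a truncated state = truncation of one insertion into the full state.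
theorem stepB_take (p : String × String × String) (S : List (String × String × String)) (t : Int) :
    (let b := pvInsB p (S.take t.toNat);
       if (b.length : Int) > t then b.dropLast else b)
      = (PySem.List.insertBy
          (fun a b => decide (PySem.Str.len a.2.2 < PySem.Str.len b.2.2)) p S).take t.toNat := by
  simp only [pvInsB_eq_insertBy]
  set lt := fun a b : String × String × String =>
    decide (PySem.Str.len a.2.2 < PySem.Str.len b.2.2) with hlt
  have hlen : ∀ (x : String × String × String) (l : List (String × String × String)),
      (PySem.List.insertBy lt x l).length = l.length + 1 := by
    intro x l
    induction l with
    | nil => simp [PySem.List.insertBy]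
    | cons y ys ih => by_cases h : lt x y = true <;> simp [PySem.List.insertBy, h, ih]
  by_cases hS : S.length < t.toNat
  · -- buffer not yet full: insertion does not overflow
    have htake : S.take t.toNat = S := List.take_of_length_le (Nat.le_of_lt hS)
    have hb : (PySem.List.insertBy lt p S).length = S.length + 1 := hlen p S
    have hnot : ¬ ((PySem.List.insertBy lt p S).length : Int) > t := by
      rw [hb]; omega
    simp only [htake, hnot, if_false]
    exact (List.take_of_length_le (by omega)).symm
  · -- buffer full (or t ≤ 0): one element is dropped from the end
    have hk : (S.take t.toNat).length = t.toNat := by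
      simp [List.length_take]; omega
    have hb : (PySem.List.insertBy lt p (S.take t.toNat)).length = t.toNat + 1 := by
      rw [hlen, hk]
    have hpop : ((PySem.List.insertBy lt p (S.take t.toNat)).length : Int) > t := by
      rw [hb]; omega
    simp only [hpop, if_true]
    rw [List.dropLast_eq_take, hb]
    simpa using take_insertBy lt p S t.toNat

-- B's fold from a truncated state computes the truncated insertion-sort of the qualifying elements.
theorem foldB_char (xs : List (String × String × String)) (t m : Int)
    (S : List (String × String × String)) :
    xs.foldl
      (fun best p =>
        if PySem.Str.len p.2.2 < m then best
        else
          let b := pvInsB p best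
          if (b.length : Int) > t then b.dropLast else b)
      (S.take t.toNat)
    = ((xs.filter (fun p => decide (m ≤ PySem.Str.len p.2.2))).foldl
        (fun acc x => PySem.List.insertBy
          (fun a b => decide (PySem.Str.len a.2.2 < PySem.Str.len b.2.2)) x acc) S).take t.toNat := by
  induction xs generalizing S with
  | nil => rfl
  | cons x xs ih =>
    simp only [List.foldl_cons, List.filter_cons]
    by_cases hq : PySem.Str.len x.2.2 < m
    · have : ¬ m ≤ PySem.Str.len x.2.2 := not_le.mpr hq
      simp only [hq, if_true, this, decide_false]
      exact ih S
    · have hm : m ≤ PySem.Str.len x.2.2 := le_of_not_gt hq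
      simp only [hq, if_false, hm, decide_true]
      rw [stepB_take x S t]
      exact ih _

-- ===== VERDICT (by name: the statement is the Claim_ definition above) =====
theorem minLength_selection_spec : Claim_equal_minLength_selection := by
  intro xs t m _
  unfold Spec_minLength_selection minLength_selection minLength_selection_alt
  rw [pvLoopA_char]
  simp only [List.drop_zero, List.length_nil, Nat.cast_zero, Int.sub_zero, List.nil_append]
  rw [filter_sorted (fun p => PySem.Str.len p.2.2) (fun p => decide (m ≤ PySem.Str.len p.2.2)) xs]
  have h0 : ([] : List (String × String × String)) = ([] : List (String × String × String)).take t.toNat := by simp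
  rw [h0, foldB_char]
  rw [PySem.List.sorted_eq_foldl_insertBy]
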